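-- pv_equiv track=rewrite | github.com/Gazman-Dev/sheriffclaw | python_openclaw/memory/sessions.py | _markdown_to_messages
-- ===== SOURCE A (Python) =====
-- def _markdown_to_messages(text: str) -> list[dict]:
--     blocks = [part.strip() for part in text.split("\n## ") if part.strip()]
--     parsed: list[dict] = []
--     for index, block in enumerate(blocks):
--         if index == 0 and block.startswith("## "):
--             block = block[3:]
--         lines = block.splitlines()
--         if not lines:
--             continue
--         heading = lines[0].split("[", 1)[0].strip().lower()
--         content = "\n".join(lines[1:]).strip()
--         if heading.startswith("user"):
--             parsed.append({"role": "user", "content": content})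
--         elif heading.startswith("assistant"):
--             parsed.append({"role": "assistant", "content": content})
--         elif heading.startswith("system"):
--             parsed.append({"role": "system", "content": content})
--         else:
--             parsed.append({"role": "tool", "content": content})
--     return parsed
-- ===== SOURCE B (Python) =====
-- def _markdown_to_messages(text: str) -> list[dict]:
--     # Single line-by-line scan: buffer the lines of the current section and
--     # flush at every "## "-boundary instead of splitting the whole text first.
--     roles = ("user", "assistant", "system")
--     parsed: list[dict] = []
--     emitted = False
--
--     def flush(buf):
--         nonlocal emitted
--         block = "\n".join(buf).strip()
--         if not block:
--             return
--         if not emitted and block.startswith("## "):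
--             block = block[3:]
--         emitted = True
--         lines = block.splitlines()
--         heading = lines[0].split("[", 1)[0].strip().lower()
--         content = "\n".join(lines[1:]).strip()
--         role = next((r for r in roles if heading.startswith(r)), "tool")
--         parsed.append({"role": role, "content": content})
--
--     buf: list[str] = []
--     for line in text.split("\n"):
--         if buf and line.startswith("## "):
--             flush(buf)
--             buf = [line[3:]]
--         else:
--             buf.append(line)
--     flush(buf)
--     return parsed
-- ===== Notes on version B (the rewrite author's own statement) =====
-- stated objective: alternative
-- what changed: Replaces split-whole-text-on-"\n## "-then-enumerate-and-classify with a single line-by-line scan that buffers the current section's lines, flushes at each "## " boundary, tracks first-emitted-section with a flag instead of the enumerate index, and picks the role by scanning a roles tuple instead of an if/elif chain.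
import Mathlib
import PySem

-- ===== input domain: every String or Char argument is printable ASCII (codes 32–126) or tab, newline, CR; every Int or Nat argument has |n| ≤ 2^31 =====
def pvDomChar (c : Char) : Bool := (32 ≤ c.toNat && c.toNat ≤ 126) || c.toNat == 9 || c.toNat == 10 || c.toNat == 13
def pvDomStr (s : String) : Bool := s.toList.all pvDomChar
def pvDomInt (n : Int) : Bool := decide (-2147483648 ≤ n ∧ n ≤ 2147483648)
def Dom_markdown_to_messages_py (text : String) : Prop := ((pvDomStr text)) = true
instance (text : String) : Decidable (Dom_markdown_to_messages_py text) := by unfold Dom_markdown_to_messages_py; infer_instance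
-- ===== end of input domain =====

-- B re-implements A as a single line-by-line scan (buffer the current section, flush at
-- each "## " boundary) instead of split-on-"\n## "-then-enumerate; same return value.

-- ===== PORT A =====
-- A's loop body on the (index, block) pair: un-prefix the first block, classify by heading.
def mdStepA (parsed : List (List (String × String))) (ib : Int × List Char) :
    List (List (String × String)) :=
  let block := if ib.1 = 0 ∧ PySem.Chars.startswith ib.2 ['#', '#', ' '] then ib.2.drop 3 else ib.2
  match PySem.Chars.splitlines block with
  | [] => parsed
  | l0 :: rest =>
    let heading := PySem.Chars.lower (PySem.Chars.strip ((PySem.Chars.splitOnMax l0 ['['] 1).headD []))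
    let content := PySem.Chars.strip (PySem.Chars.join ['\n'] rest)
    if PySem.Chars.startswith heading ['u', 's', 'e', 'r'] then
      parsed ++ [[("role", "user"), ("content", String.mk content)]]
    else if PySem.Chars.startswith heading ['a', 's', 's', 'i', 's', 't', 'a', 'n', 't'] then
      parsed ++ [[("role", "assistant"), ("content", String.mk content)]]
    else if PySem.Chars.startswith heading ['s', 'y', 's', 't', 'e', 'm'] then
      parsed ++ [[("role", "system"), ("content", String.mk content)]]
    else
      parsed ++ [[("role", "tool"), ("content", String.mk content)]]

def markdown_to_messages_py (text : String) : List (List (String × String)) :=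
  let blocks := (PySem.Chars.splitOn text.toList ['\n', '#', '#', ' ']).filterMap (fun part =>
    let s := PySem.Chars.strip part
    if s = [] then none else some s)
  (PySem.List.enumerate blocks 0).foldl mdStepA []

-- ===== PORT B =====
-- B's flush(buf): join the buffered lines, strip, drop if empty, un-prefix the first
-- emitted section, classify by scanning the roles tuple.
def mdFlush (emitted : Bool) (parsed : List (List (String × String))) (buf : List (List Char)) :
    Bool × List (List (String × String)) :=
  let block := PySem.Chars.strip (PySem.Chars.join ['\n'] buf)
  if block = [] then (emitted, parsed)
  else
    let block := if !emitted && PySem.Chars.startswith block ['#', '#', ' '] then block.drop 3 else block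
    let lines := PySem.Chars.splitlines block
    -- block ≠ [] here, so `lines` is nonempty: headD/tail are Python's lines[0] / lines[1:]
    let heading := PySem.Chars.lower (PySem.Chars.strip ((PySem.Chars.splitOnMax (lines.headD []) ['['] 1).headD []))
    let content := PySem.Chars.strip (PySem.Chars.join ['\n'] lines.tail)
    let role := [("user", ['u', 's', 'e', 'r']), ("assistant", ['a', 's', 's', 'i', 's', 't', 'a', 'n', 't']),
                 ("system", ['s', 'y', 's', 't', 'e', 'm'])].foldr
      (fun rp acc => if PySem.Chars.startswith heading rp.2 then rp.1 else acc) "tool"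
    (true, parsed ++ [[("role", role), ("content", String.mk content)]])

-- B's loop body: flush the buffer at a "## " boundary, otherwise keep buffering the line.
def mdStepB (st : List (List Char) × Bool × List (List (String × String))) (line : List Char) :
    List (List Char) × Bool × List (List (String × String)) :=
  if st.1 ≠ [] ∧ PySem.Chars.startswith line ['#', '#', ' '] then
    let ep := mdFlush st.2.1 st.2.2 st.1
    ([line.drop 3], ep.1, ep.2)
  else
    (st.1 ++ [line], st.2.1, st.2.2)

def markdown_to_messages_py_alt (text : String) : List (List (String × String)) :=
  let st := (PySem.Chars.splitOn text.toList ['\n']).foldl mdStepB ([], false, [])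
  (mdFlush st.2.1 st.2.2 st.1).2

-- ===== PRECONDITION & SPEC =====
def Spec_markdown_to_messages_py (text : String) (out : List (List (String × String))) : Prop := out = markdown_to_messages_py_alt text
instance (text : String) (out : List (List (String × String))) : Decidable (Spec_markdown_to_messages_py text out) := by unfold Spec_markdown_to_messages_py; infer_instance

-- ===== CLAIM (what is proved, stated in full; the proofs are below) =====
def Claim_equal_markdown_to_messages_py : Prop := ∀ (text : String), Dom_markdown_to_messages_py text → Spec_markdown_to_messages_py text (markdown_to_messages_py text)

-- ===== LEMMAS AND PROOFS =====

/-- Prepend `a` to the first piece of a split result. -/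
def consHead (a : List Char) : List (List Char) → List (List Char)
  | [] => [a]
  | x :: xs => (a ++ x) :: xs

/-- Fuelled, accumulator-free restatement of `PySem.Chars.splitOn.go`. -/
def splitF (sep : List Char) : Nat → List Char → List (List Char)
  | 0, l => [l]
  | _ + 1, [] => [[]]
  | f + 1, c :: rest =>
    if sep.isPrefixOf (c :: rest) then [] :: splitF sep f (List.drop sep.length (c :: rest))
    else consHead [c] (splitF sep f rest)

/-- `text.split("\n")`, structural form. -/
def splitNL : List Char → List (List Char)
  | [] => [[]]
  | c :: rest => if c = '\n' then [] :: splitNL rest else consHead [c] (splitNL rest)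

/-- `text.split("\n## ")`, structural form. -/
def splitSEP : List Char → List (List Char)
  | [] => [[]]
  | c :: rest =>
    if ['\n', '#', '#', ' '].isPrefixOf (c :: rest) then [] :: splitSEP (rest.drop 3)
    else consHead [c] (splitSEP rest)
termination_by l => l.length
decreasing_by
  · simp only [List.length_cons, List.length_drop]; omega
  · simp only [List.length_cons]; omega

/-- Regroup the "\n"-split lines into the "\n## "-split parts. -/
def grp (cur : List Char) : List (List Char) → List (List Char)
  | [] => [cur]
  | l :: ls => if ['#', '#', ' '].isPrefixOf l then cur :: grp (l.drop 3) ls else grp (cur ++ '\n' :: l) ls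

def regroup : List (List Char) → List (List Char)
  | [] => []
  | x :: xs => grp x xs

/-- The "## " un-prefixing applied to the first kept block. -/
def hh0 (b : List Char) : List Char := if ['#', '#', ' '].isPrefixOf b then b.drop 3 else b

/-- The message built from one (nonempty) block. -/
def mdMsg (block : List Char) : List (String × String) :=
  let lines := PySem.Chars.splitlines block
  let heading := PySem.Chars.lower (PySem.Chars.strip ((PySem.Chars.splitOnMax (lines.headD []) ['['] 1).headD []))
  let content := PySem.Chars.strip (PySem.Chars.join ['\n'] lines.tail)
  let role := [("user", ['u', 's', 'e', 'r']), ("assistant", ['a', 's', 's', 'i', 's', 't', 'a', 'n', 't']),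
               ("system", ['s', 'y', 's', 't', 'e', 'm'])].foldr
    (fun rp acc => if PySem.Chars.startswith heading rp.2 then rp.1 else acc) "tool"
  [("role", role), ("content", String.mk content)]

/-- `mdFlush` with the joined buffer as the argument. -/
def mdFlushJ (e : Bool) (p : List (List (String × String))) (j : List Char) :
    Bool × List (List (String × String)) :=
  let block := PySem.Chars.strip j
  if block = [] then (e, p)
  else (true, p ++ [mdMsg (if !e && PySem.Chars.startswith block ['#', '#', ' '] then block.drop 3 else block)])

def stepJ (s : Bool × List (List (String × String))) (j : List Char) :
    Bool × List (List (String × String)) := mdFlushJ s.1 s.2 j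

/-- What both programs produce on the list of kept (stripped, nonempty) blocks. -/
def canonList : Bool → List (List Char) → List (List (String × String))
  | _, [] => []
  | true, b :: bs => mdMsg b :: canonList true bs
  | false, b :: bs => mdMsg (hh0 b) :: canonList true bs

lemma consHead_ne_nil (a : List Char) (xs : List (List Char)) : consHead a xs ≠ [] := by
  cases xs <;> simp [consHead]

lemma consHead_nil (xs : List (List Char)) (h : xs ≠ []) : consHead [] xs = xs := by
  cases xs with
  | nil => exact absurd rfl h
  | cons x xs => simp [consHead]

lemma consHead_consHead (a b : List Char) (xs : List (List Char)) :
    consHead a (consHead b xs) = consHead (a ++ b) xs := by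
  cases xs <;> simp [consHead]

lemma splitF_ne_nil (sep : List Char) (f : Nat) (l : List Char) : splitF sep f l ≠ [] := by
  cases f with
  | zero => simp [splitF]
  | succ f =>
    cases l with
    | nil => simp [splitF]
    | cons c rest =>
      simp only [splitF]
      split
      · simp
      · exact consHead_ne_nil _ _

lemma go_eq (sep : List Char) : ∀ (fuel : Nat) (l cur : List Char) (acc : List (List Char)),
    PySem.Chars.splitOn.go sep fuel l cur acc = acc.reverse ++ consHead cur.reverse (splitF sep fuel l) := by
  intro fuel
  induction fuel with
  | zero =>
    intro l cur acc
    rw [PySem.Chars.splitOn.go.eq_def]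
    simp [splitF, consHead]
  | succ f ih =>
    intro l cur acc
    cases l with
    | nil =>
      rw [PySem.Chars.splitOn.go.eq_def]
      simp [splitF, consHead]
    | cons c rest =>
      rw [PySem.Chars.splitOn.go.eq_def]
      simp only [splitF]
      by_cases hp : sep.isPrefixOf (c :: rest) = true
      · simp only [hp, if_true, ih, List.reverse_nil]
        rw [consHead_nil _ (splitF_ne_nil _ _ _)]
        cases hsp : splitF sep f (List.drop sep.length (c :: rest)) with
        | nil => exact absurd hsp (splitF_ne_nil _ _ _)
        | cons x xs => simp [consHead]
      · simp only [hp, if_false, Bool.false_eq_true, ih]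
        rw [consHead_consHead]
        simp [consHead]

lemma splitF_NL : ∀ (f : Nat) (l : List Char), l.length < f → splitF ['\n'] f l = splitNL l := by
  intro f
  induction f with
  | zero => intro l h; omega
  | succ f ih =>
    intro l h
    cases l with
    | nil => simp [splitF, splitNL]
    | cons c rest =>
      have hrest : rest.length < f := by simp at h; omega
      simp only [splitF, splitNL]
      by_cases hc : c = '\n'
      · subst hc
        have hp : (['\n'].isPrefixOf ('\n' :: rest)) = true := by
          rw [List.isPrefixOf_iff_prefix]
          exact List.cons_prefix_cons.mpr ⟨rfl, List.nil_prefix⟩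
        simp [hp, ih rest hrest]
      · have hp : (['\n'].isPrefixOf (c :: rest)) = false := by
          rw [Bool.eq_false_iff]
          intro hx
          rw [List.isPrefixOf_iff_prefix, List.cons_prefix_cons] at hx
          exact hc hx.1.symm
        simp [hp, hc, ih rest hrest]

lemma splitF_SEP : ∀ (f : Nat) (l : List Char),
    l.length < f → splitF ['\n', '#', '#', ' '] f l = splitSEP l := by
  intro f
  induction f with
  | zero => intro l h; omega
  | succ f ih =>
    intro l h
    cases l with
    | nil => simp [splitF, splitSEP]
    | cons c rest =>
      have hrest : rest.length < f := by simp at h; omega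
      rw [splitSEP]
      simp only [splitF]
      by_cases hp : (['\n', '#', '#', ' '].isPrefixOf (c :: rest)) = true
      · have hdrop : List.drop (['\n', '#', '#', ' '].length) (c :: rest) = rest.drop 3 := by simp
        have hdl : (rest.drop 3).length < f := by simp; omega
        simp only [hp, if_true, hdrop, ih _ hdl]
      · simp only [hp, if_false, Bool.false_eq_true, ih rest hrest]

lemma splitNL_ne_nil (l : List Char) : splitNL l ≠ [] := by
  cases l with
  | nil => simp [splitNL]
  | cons c rest =>
    simp only [splitNL]
    split
    · simp
    · exact consHead_ne_nil _ _

lemma splitSEP_ne_nil (l : List Char) : splitSEP l ≠ [] := by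
  cases l with
  | nil => simp [splitSEP]
  | cons c rest =>
    rw [splitSEP]
    split
    · simp
    · exact consHead_ne_nil _ _

lemma splitOn_NL (cs : List Char) : PySem.Chars.splitOn cs ['\n'] = splitNL cs := by
  rw [PySem.Chars.splitOn, go_eq, splitF_NL _ _ (by omega)]
  simp only [List.reverse_nil, List.nil_append]
  exact consHead_nil _ (splitNL_ne_nil cs)

lemma splitOn_SEP (cs : List Char) :
    PySem.Chars.splitOn cs ['\n', '#', '#', ' '] = splitSEP cs := by
  rw [PySem.Chars.splitOn, go_eq, splitF_SEP _ _ (by omega)]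
  simp only [List.reverse_nil, List.nil_append]
  exact consHead_nil _ (splitSEP_ne_nil cs)

lemma splitNL_head_prefix : ∀ (cs x : List Char) (xs : List (List Char)),
    splitNL cs = x :: xs → x <+: cs := by
  intro cs
  induction cs with
  | nil =>
    intro x xs h
    simp [splitNL] at h
    simp [h.1]
  | cons c rest ih =>
    intro x xs h
    simp only [splitNL] at h
    by_cases hc : c = '\n'
    · subst hc
      rw [if_pos rfl] at h
      cases h
      exact List.nil_prefix
    · simp only [hc, if_false] at h
      cases hs : splitNL rest with
      | nil => exact absurd hs (splitNL_ne_nil rest)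
      | cons y ys =>
        rw [hs] at h
        simp only [consHead, List.singleton_append, List.cons.injEq] at h
        rw [← h.1]
        exact List.cons_prefix_cons.mpr ⟨rfl, ih y ys hs⟩

lemma splitNL_append (a t : List Char) (ha : ∀ c ∈ a, c ≠ '\n') :
    splitNL (a ++ t) = consHead a (splitNL t) := by
  induction a with
  | nil => simp [consHead_nil _ (splitNL_ne_nil t)]
  | cons c a ih =>
    have hc : c ≠ '\n' := ha c (by simp)
    simp only [List.cons_append, splitNL, hc, if_false]
    rw [ih (fun c' hc' => ha c' (by simp [hc']))]
    rw [consHead_consHead]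
    rfl

lemma splitNL_cons_nl (r : List Char) : splitNL ('\n' :: r) = [] :: splitNL r := by
  simp [splitNL]

lemma splitNL_cons_other (c : Char) (r : List Char) (hc : c ≠ '\n') :
    splitNL (c :: r) = consHead [c] (splitNL r) := by
  simp [splitNL, hc]

lemma grp_append : ∀ (ls : List (List Char)) (a cur : List Char),
    grp (a ++ cur) ls = consHead a (grp cur ls) := by
  intro ls
  induction ls with
  | nil => intro a cur; simp [grp, consHead]
  | cons l ls ih =>
    intro a cur
    simp only [grp]
    split
    · simp [consHead]
    · rw [List.append_assoc]
      exact ih a (cur ++ '\n' :: l)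

lemma splitSEP_eq_regroup_aux : ∀ (n : Nat) (l : List Char), l.length ≤ n →
    splitSEP l = regroup (splitNL l) := by
  intro n
  induction n with
  | zero =>
    intro l h
    have hl : l = [] := by
      cases l with
      | nil => rfl
      | cons c r => simp at h
    subst hl
    simp [splitSEP, splitNL, regroup, grp]
  | succ n ih =>
    intro l h
    cases l with
    | nil => simp [splitSEP, splitNL, regroup, grp]
    | cons c rest =>
      by_cases hc : c = '\n'
      · subst hc
        by_cases hp : ['#', '#', ' '] <+: rest
        · obtain ⟨t, rfl⟩ := hp
          have ht : t.length ≤ n := by simp at h; omega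
          rw [splitSEP]
          have hcond : (['\n', '#', '#', ' '].isPrefixOf ('\n' :: (['#', '#', ' '] ++ t))) = true := by
            rw [List.isPrefixOf_iff_prefix]
            exact List.cons_prefix_cons.mpr ⟨rfl, List.prefix_append _ _⟩
          rw [if_pos hcond]
          have hdrop : (['#', '#', ' '] ++ t).drop 3 = t := by simp
          rw [hdrop]
          have hnn : ∀ c ∈ (['#', '#', ' '] : List Char), c ≠ '\n' := by
            intro c hc
            fin_cases hc <;> decide
          rw [splitNL_cons_nl, splitNL_append ['#', '#', ' '] t hnn]
          cases hst : splitNL t with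
          | nil => exact absurd hst (splitNL_ne_nil t)
          | cons y ys =>
            rw [show consHead ['#', '#', ' '] (y :: ys) = (['#', '#', ' '] ++ y) :: ys from rfl]
            simp only [regroup, grp]
            have hpy : (['#', '#', ' '].isPrefixOf (['#', '#', ' '] ++ y)) = true := by
              rw [List.isPrefixOf_iff_prefix]
              exact List.prefix_append _ _
            rw [if_pos hpy]
            have hdy : (['#', '#', ' '] ++ y).drop 3 = y := by simp
            rw [hdy]
            have h2 := ih t ht
            rw [hst] at h2
            simp only [regroup] at h2
            rw [h2]
        · rw [splitSEP]
          have hrest : rest.length ≤ n := by simp at h; omega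
          have hcond : (['\n', '#', '#', ' '].isPrefixOf ('\n' :: rest)) = false := by
            rw [Bool.eq_false_iff]
            intro hx
            rw [List.isPrefixOf_iff_prefix, List.cons_prefix_cons] at hx
            exact hp hx.2
          rw [if_neg (by simp [hcond])]
          rw [splitNL_cons_nl]
          cases hs : splitNL rest with
          | nil => exact absurd hs (splitNL_ne_nil rest)
          | cons x xs =>
            simp only [regroup, grp]
            have hpx : (['#', '#', ' '].isPrefixOf x) = false := by
              rw [Bool.eq_false_iff]
              intro hx
              rw [List.isPrefixOf_iff_prefix] at hx
              exact hp (hx.trans (splitNL_head_prefix rest x xs hs))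
            rw [if_neg (by simp [hpx])]
            rw [show ([] : List Char) ++ '\n' :: x = ['\n'] ++ x from by simp, grp_append]
            have h2 := ih rest hrest
            rw [hs] at h2
            simp only [regroup] at h2
            rw [h2]
      · rw [splitSEP]
        have hrest : rest.length ≤ n := by simp at h; omega
        have hcond : (['\n', '#', '#', ' '].isPrefixOf (c :: rest)) = false := by
          rw [Bool.eq_false_iff]
          intro hx
          rw [List.isPrefixOf_iff_prefix, List.cons_prefix_cons] at hx
          exact hc hx.1.symm
        rw [if_neg (by simp [hcond])]
        rw [splitNL_cons_other c rest hc]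
        cases hs : splitNL rest with
        | nil => exact absurd hs (splitNL_ne_nil rest)
        | cons x xs =>
          rw [show consHead [c] (x :: xs) = ([c] ++ x) :: xs from rfl]
          simp only [regroup]
          rw [grp_append]
          have h2 := ih rest hrest
          rw [hs] at h2
          simp only [regroup] at h2
          rw [h2]

lemma splitSEP_eq_regroup (cs : List Char) : splitSEP cs = regroup (splitNL cs) :=
  splitSEP_eq_regroup_aux cs.length cs le_rfl

lemma joinNL_singleton (a : List Char) : PySem.Chars.join ['\n'] [a] = a := by
  simp [PySem.Chars.join, List.intercalate]

lemma joinNL_append_singleton : ∀ (buf : List (List Char)), buf ≠ [] → ∀ (l : List Char),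
    PySem.Chars.join ['\n'] (buf ++ [l]) = PySem.Chars.join ['\n'] buf ++ '\n' :: l := by
  intro buf
  induction buf with
  | nil => intro h; exact absurd rfl h
  | cons a buf ih =>
    intro _ l
    cases buf with
    | nil => simp [PySem.Chars.join, List.intercalate]
    | cons b r =>
      have h1 : PySem.Chars.join ['\n'] (a :: b :: r) = a ++ '\n' :: PySem.Chars.join ['\n'] (b :: r) := by
        simp [PySem.Chars.join, List.intercalate]
      have h2 : PySem.Chars.join ['\n'] (a :: ((b :: r) ++ [l])) =
          a ++ '\n' :: PySem.Chars.join ['\n'] ((b :: r) ++ [l]) := by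
        simp [PySem.Chars.join, List.intercalate]
      rw [List.cons_append, h2, ih (by simp) l, h1]
      simp

lemma splitlines_go_nil_ne_nil (isB : Char → Bool) (cur : List Char)
    (acc : List (List Char)) (h : cur ≠ [] ∨ acc ≠ []) :
    PySem.Chars.splitlines.go isB [] cur acc ≠ [] := by
  rw [PySem.Chars.splitlines.go.eq_def]
  simp only []
  split
  · rename_i hcur
    rcases h with h | h
    · exact absurd (by simpa [List.isEmpty_iff] using hcur) h
    · simpa using h
  · simp

lemma splitlines_go_ne_nil : ∀ (n : Nat) (isB : Char → Bool) (s cur : List Char)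
    (acc : List (List Char)), s.length ≤ n → (cur ≠ [] ∨ acc ≠ []) →
    PySem.Chars.splitlines.go isB s cur acc ≠ [] := by
  intro n
  induction n with
  | zero =>
    intro isB s cur acc hl h
    have hs : s = [] := by cases s with
      | nil => rfl
      | cons c r => simp at hl
    subst hs
    exact splitlines_go_nil_ne_nil isB cur acc h
  | succ n ih =>
    intro isB s cur acc hl h
    cases s with
    | nil =>
      exact splitlines_go_nil_ne_nil isB cur acc h
    | cons c rest =>
      rw [PySem.Chars.splitlines.go.eq_def]
      split
      · exact absurd ‹c :: rest = []› (by simp)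
      · rename_i rest2 heq
        have hlen : rest2.length ≤ n := by
          have hl2 := congrArg List.length ‹c :: rest = '\x0d' :: '\n' :: rest2›
          simp at hl2 hl
          omega
        exact ih isB rest2 [] _ hlen (Or.inr (by simp))
      · rename_i cc rr hno heq
        have hlen : rr.length ≤ n := by
          have hl2 := congrArg List.length heq
          simp at hl2 hl
          omega
        split
        · exact ih isB rr [] _ hlen (Or.inr (by simp))
        · exact ih isB rr _ _ hlen (Or.inl (by simp))

lemma splitlines_ne_nil (block : List Char) (hb : block ≠ []) :
    PySem.Chars.splitlines block ≠ [] := by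
  rw [PySem.Chars.splitlines]
  cases block with
  | nil => exact absurd rfl hb
  | cons c rest =>
    rw [PySem.Chars.splitlines.go.eq_def]
    split
    · exact absurd ‹c :: rest = []› (by simp)
    · rename_i rest2 heq
      exact splitlines_go_ne_nil rest2.length _ rest2 [] _ le_rfl (Or.inr (by simp))
    · rename_i cc rr hno heq
      split
      · exact splitlines_go_ne_nil rr.length _ rr [] _ le_rfl (Or.inr (by simp))
      · exact splitlines_go_ne_nil rr.length _ rr _ _ le_rfl (Or.inl (by simp))

lemma dropWhile_cons_false {p : Char → Bool} :
    ∀ (l : List Char) (a : Char) (t : List Char), l.dropWhile p = a :: t → p a = false := by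
  intro l
  induction l with
  | nil => intro a t h; simp [List.dropWhile] at h
  | cons c r ih =>
    intro a t h
    by_cases hp : p c = true
    · rw [List.dropWhile_cons_of_pos hp] at h
      exact ih a t h
    · rw [List.dropWhile_cons_of_neg hp] at h
      cases h
      simpa using hp

lemma strip_ne_HH (j : List Char) : PySem.Chars.strip j ≠ ['#', '#', ' '] := by
  intro h
  rw [PySem.Chars.strip, PySem.Chars.rstrip] at h
  have h2 : List.dropWhile PySem.Chars.isspace (PySem.Chars.lstrip j).reverse = [' ', '#', '#'] := by
    have := congrArg List.reverse h
    simpa using this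
  have h3 := dropWhile_cons_false _ _ _ h2
  rw [show PySem.Chars.isspace ' ' = true from by decide] at h3
  exact absurd h3 (by decide)

lemma hh0_ne_nil (b : List Char) (hb : b ≠ []) (hH : b ≠ ['#', '#', ' ']) : hh0 b ≠ [] := by
  unfold hh0
  split
  · rename_i hpfx
    rw [List.isPrefixOf_iff_prefix] at hpfx
    obtain ⟨u, rfl⟩ := hpfx
    cases u with
    | nil => exact absurd (by simp) hH
    | cons d u => simp
  · exact hb

lemma mdFlush_eq (e : Bool) (p : List (List (String × String))) (buf : List (List Char)) :
    mdFlush e p buf = mdFlushJ e p (PySem.Chars.join ['\n'] buf) := rfl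

lemma mdFlushJ_empty (e : Bool) (p : List (List (String × String))) (j : List Char)
    (h : PySem.Chars.strip j = []) : mdFlushJ e p j = (e, p) := by
  simp [mdFlushJ, h]

lemma mdFlushJ_true (p : List (List (String × String))) (j : List Char)
    (h : PySem.Chars.strip j ≠ []) :
    mdFlushJ true p j = (true, p ++ [mdMsg (PySem.Chars.strip j)]) := by
  simp [mdFlushJ, h]

lemma mdFlushJ_false (p : List (List (String × String))) (j : List Char)
    (h : PySem.Chars.strip j ≠ []) :
    mdFlushJ false p j = (true, p ++ [mdMsg (hh0 (PySem.Chars.strip j))]) := by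
  simp only [mdFlushJ, h, if_neg h, hh0, PySem.Chars.startswith, Bool.not_false, Bool.true_and]
  rfl

lemma mdStepA_pos (parsed : List (List (String × String))) (i : Int) (b : List Char)
    (hi : ¬ i = 0) (hb : b ≠ []) : mdStepA parsed (i, b) = parsed ++ [mdMsg b] := by
  cases hsp : PySem.Chars.splitlines b with
  | nil => exact absurd hsp (splitlines_ne_nil b hb)
  | cons l0 rest =>
    simp only [mdStepA]
    rw [show (if i = 0 ∧ PySem.Chars.startswith b ['#', '#', ' '] = true then List.drop 3 b else b) = b
      from if_neg (by intro hand; exact hi hand.1)]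
    rw [hsp]
    simp only [mdMsg]
    rw [hsp]
    simp only [List.headD_cons, List.tail_cons, List.foldr]
    split_ifs <;> rfl

lemma mdStepA_zero (parsed : List (List (String × String))) (b : List Char)
    (hb : b ≠ []) (hH : b ≠ ['#', '#', ' ']) :
    mdStepA parsed (0, b) = parsed ++ [mdMsg (hh0 b)] := by
  cases hsp : PySem.Chars.splitlines (hh0 b) with
  | nil => exact absurd hsp (splitlines_ne_nil _ (hh0_ne_nil b hb hH))
  | cons l0 rest =>
    simp only [mdStepA]
    rw [show (if True ∧ PySem.Chars.startswith b ['#', '#', ' '] = true then List.drop 3 b else b) = hh0 b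
      from by simp [hh0, PySem.Chars.startswith]]
    rw [hsp]
    simp only [mdMsg]
    rw [hsp]
    simp only [List.headD_cons, List.tail_cons, List.foldr]
    split_ifs <;> rfl

lemma enum_fold_pos : ∀ (bs : List (List Char)) (s : Int)
    (acc : List (List (String × String))), 1 ≤ s → (∀ b ∈ bs, b ≠ []) →
    (PySem.List.enumerate bs s).foldl mdStepA acc = acc ++ canonList true bs := by
  intro bs
  induction bs with
  | nil => intro s acc _ _; simp [PySem.List.enumerate_nil, canonList]
  | cons b bs ih =>
    intro s acc hs hbs
    rw [PySem.List.enumerate_cons]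
    simp only [List.foldl_cons]
    rw [mdStepA_pos acc s b (by omega) (hbs b (by simp))]
    rw [ih (s + 1) _ (by omega) (fun b' hb' => hbs b' (by simp [hb']))]
    simp [canonList]

lemma sideA (blocks : List (List Char)) (h : ∀ b ∈ blocks, b ≠ [] ∧ b ≠ ['#', '#', ' ']) :
    (PySem.List.enumerate blocks 0).foldl mdStepA [] = canonList false blocks := by
  cases blocks with
  | nil => simp [PySem.List.enumerate_nil, canonList]
  | cons b bs =>
    rw [PySem.List.enumerate_cons]
    simp only [List.foldl_cons]
    rw [mdStepA_zero [] b (h b (by simp)).1 (h b (by simp)).2]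
    rw [enum_fold_pos bs (0 + 1) _ (by omega) (fun b' hb' => (h b' (by simp [hb'])).1)]
    simp [canonList]

lemma sideB : ∀ (parts : List (List Char)) (e : Bool) (p : List (List (String × String))),
    (parts.foldl stepJ (e, p)).2 = p ++ canonList e (parts.filterMap (fun part =>
      let s := PySem.Chars.strip part
      if s = [] then none else some s)) := by
  intro parts
  induction parts with
  | nil => intro e p; simp [canonList]
  | cons part parts ih =>
    intro e p
    simp only [List.foldl_cons, List.filterMap_cons]
    by_cases hs : PySem.Chars.strip part = []
    · have hstep : stepJ (e, p) part = (e, p) := by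
        simp [stepJ, mdFlushJ_empty _ _ _ hs]
      rw [hstep]
      simp only [hs, if_pos rfl]
      exact ih e p
    · simp only [hs, if_neg hs]
      cases e with
      | true =>
        have hstep : stepJ (true, p) part = (true, p ++ [mdMsg (PySem.Chars.strip part)]) := by
          simp [stepJ, mdFlushJ_true _ _ hs]
        rw [hstep, ih]
        simp [canonList]
      | false =>
        have hstep : stepJ (false, p) part = (true, p ++ [mdMsg (hh0 (PySem.Chars.strip part))]) := by
          simp [stepJ, mdFlushJ_false _ _ hs]
        rw [hstep, ih]
        simp [canonList]

lemma scan_eq : ∀ (ls buf : List (List Char)) (e : Bool)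
    (p : List (List (String × String))), buf ≠ [] →
    (mdFlush (ls.foldl mdStepB (buf, e, p)).2.1 (ls.foldl mdStepB (buf, e, p)).2.2
      (ls.foldl mdStepB (buf, e, p)).1).2
      = ((grp (PySem.Chars.join ['\n'] buf) ls).foldl stepJ (e, p)).2 := by
  intro ls
  induction ls with
  | nil =>
    intro buf e p hb
    simp only [List.foldl_nil, grp, List.foldl_cons]
    rw [mdFlush_eq]
    rfl
  | cons l ls ih =>
    intro buf e p hb
    simp only [List.foldl_cons]
    by_cases hp : (['#', '#', ' '].isPrefixOf l) = true
    · have hstep : mdStepB (buf, e, p) l =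
          ([l.drop 3], (mdFlush e p buf).1, (mdFlush e p buf).2) := by
        simp [mdStepB, PySem.Chars.startswith, hb, hp]
      rw [hstep, ih [l.drop 3] _ _ (by simp)]
      simp only [grp, hp, if_pos rfl, List.foldl_cons, joinNL_singleton]
      rw [mdFlush_eq]
      rfl
    · have hstep : mdStepB (buf, e, p) l = (buf ++ [l], e, p) := by
        simp [mdStepB, PySem.Chars.startswith, hp]
      rw [hstep, ih (buf ++ [l]) e p (by simp)]
      rw [joinNL_append_singleton buf hb l]
      simp only [grp, hp, Bool.false_eq_true, if_false]

-- ===== VERDICT (by name: the statement is the Claim_ definition above) =====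
theorem markdown_to_messages_py_spec : Claim_equal_markdown_to_messages_py := by
  intro text _
  unfold Spec_markdown_to_messages_py
  cases hx : splitNL text.toList with
  | nil => exact absurd hx (splitNL_ne_nil _)
  | cons x xs =>
    have hfacts : ∀ b ∈ (grp x xs).filterMap (fun part =>
        let s := PySem.Chars.strip part
        if s = [] then none else some s), b ≠ [] ∧ b ≠ ['#', '#', ' '] := by
      intro b hb
      rw [List.mem_filterMap] at hb
      obtain ⟨part, _, hpart⟩ := hb
      simp only at hpart
      by_cases hs : PySem.Chars.strip part = []
      · rw [if_pos hs] at hpart; cases hpart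
      · rw [if_neg hs] at hpart
        cases hpart
        exact ⟨hs, strip_ne_HH part⟩
    have hA : markdown_to_messages_py text =
        canonList false ((grp x xs).filterMap (fun part =>
          let s := PySem.Chars.strip part
          if s = [] then none else some s)) := by
      simp only [markdown_to_messages_py]
      rw [splitOn_SEP, splitSEP_eq_regroup, hx]
      simp only [regroup]
      exact sideA _ hfacts
    have hB : markdown_to_messages_py_alt text =
        canonList false ((grp x xs).filterMap (fun part =>
          let s := PySem.Chars.strip part
          if s = [] then none else some s)) := by
      simp only [markdown_to_messages_py_alt]
      rw [splitOn_NL, hx]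
      simp only [List.foldl_cons]
      have hstep : mdStepB ([], false, []) x = ([x], false, []) := by
        simp [mdStepB]
      rw [hstep]
      rw [scan_eq xs [x] false [] (by simp), joinNL_singleton]
      rw [sideB (grp x xs) false []]
      simp
    rw [hA, hB]
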